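-- pv_equiv track=rewrite | github.com/DoreenP8387631eggy/csv-surgeon | csv_surgeon/stacker.py | unstack_rows
-- ===== SOURCE A (Python) =====
-- from typing import Iterator, List, Dict
--
-- def unstack_rows(
--     rows: Iterator[Dict[str, str]],
--     id_column: str,
--     var_column: str = "variable",
--     value_column: str = "value",
--     fill_value: str = "",
-- ) -> Iterator[Dict[str, str]]:
--     """Re-pivot stacked key/value rows back into wide format.
--
--     All rows sharing the same *id_column* value are collapsed into a
--     single output row whose extra columns come from *var_column* values.
--
--     Args:
--         rows:         Iterable of stacked row dicts.
--         id_column:    Column that identifies the original row.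
--         var_column:   Column that holds the original column name.
--         value_column: Column that holds the original cell value.
--         fill_value:   Value used when a variable is absent for an id.
--
--     Yields:
--         Wide-format row dicts, one per unique id_column value.
--     """
--     # Buffer all rows so we can collect every variable name.
--     buffered: List[Dict[str, str]] = list(rows)
--
--     # Preserve insertion order for ids and variables.
--     id_order: List[str] = []
--     var_order: List[str] = []
--     seen_ids: set = set()
--     seen_vars: set = set()
--
--     for row in buffered:
--         id_val = row.get(id_column, "")
--         var_val = row.get(var_column, "")
--         if id_val not in seen_ids:
--             id_order.append(id_val)
--             seen_ids.add(id_val)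
--         if var_val not in seen_vars:
--             var_order.append(var_val)
--             seen_vars.add(var_val)
--
--     # Build a lookup: {id_val: {var_val: value}}
--     lookup: Dict[str, Dict[str, str]] = {id_val: {} for id_val in id_order}
--     for row in buffered:
--         lookup[row.get(id_column, "")][row.get(var_column, "")] = row.get(
--             value_column, ""
--         )
--
--     for id_val in id_order:
--         out: Dict[str, str] = {id_column: id_val}
--         for var_val in var_order:
--             out[var_val] = lookup[id_val].get(var_val, fill_value)
--         yield out
-- ===== SOURCE B (Python) =====
-- def unstack_rows(
--     rows,
--     id_column,
--     var_column="variable",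
--     value_column="value",
--     fill_value="",
-- ):
--     """Table-free re-pivot: dedup the id/var orders, then resolve every
--     (id, var) cell by a reverse scan of the buffered rows for the last
--     matching stacked row (break on first hit); no id->var lookup is built."""
--     buffered = list(rows)
--     ids = list(dict.fromkeys(r.get(id_column, "") for r in buffered))
--     variables = list(dict.fromkeys(r.get(var_column, "") for r in buffered))
--     for id_val in ids:
--         out = {id_column: id_val}
--         for var_val in variables:
--             value = fill_value
--             for r in reversed(buffered):
--                 if r.get(id_column, "") == id_val and r.get(var_column, "") == var_val:
--                     value = r.get(value_column, "")
--                     break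
--             out[var_val] = value
--         yield out
-- ===== Notes on version B (the rewrite author's own statement) =====
-- stated objective: alternative
-- what changed: B builds no id->var lookup table at all: it dedups the id and variable orders with dict.fromkeys and resolves each (id, var) cell by a reverse scan of the buffered rows for the last matching row (last write wins by construction), trading A's three-pass hash-table construction for direct nested scans.
import Mathlib
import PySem

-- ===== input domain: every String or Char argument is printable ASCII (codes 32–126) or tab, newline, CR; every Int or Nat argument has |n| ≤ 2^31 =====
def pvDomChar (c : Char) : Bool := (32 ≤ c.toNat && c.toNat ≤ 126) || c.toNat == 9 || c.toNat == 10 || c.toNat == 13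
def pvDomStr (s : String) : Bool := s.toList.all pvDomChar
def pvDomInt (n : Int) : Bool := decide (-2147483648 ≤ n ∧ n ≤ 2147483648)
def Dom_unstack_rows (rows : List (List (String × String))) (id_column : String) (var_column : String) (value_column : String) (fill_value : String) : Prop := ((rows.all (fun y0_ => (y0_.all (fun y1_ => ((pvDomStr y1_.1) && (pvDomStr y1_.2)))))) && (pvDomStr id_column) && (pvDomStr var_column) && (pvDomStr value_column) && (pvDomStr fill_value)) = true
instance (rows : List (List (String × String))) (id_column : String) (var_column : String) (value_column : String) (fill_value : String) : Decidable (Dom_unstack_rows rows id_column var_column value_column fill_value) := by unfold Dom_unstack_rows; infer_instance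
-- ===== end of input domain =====

-- B drops A's id->var lookup table entirely: it resolves each (id, var) cell by a
-- reverse scan for the last matching row; objective: alternative (not faster).
-- ===== PORT A =====
-- shared helper: row.get(k, "") on a row dict (both Pythons call it identically)
def pvRowGet (row : List (String × String)) (k : String) : String :=
  (PySem.Dict.ofList row).getD k ""

def unstack_rows (rows : List (List (String × String))) (id_column : String) (var_column : String) (value_column : String) (fill_value : String) : List (List (String × String)) :=
  let buffered := rows
  let st := buffered.foldl
    (fun (st : List String × List String × PySem.Set String × PySem.Set String) row =>
      let id_val := pvRowGet row id_column
      let var_val := pvRowGet row var_column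
      let st1 :=
        if PySem.Set.contains st.2.2.1 id_val then st
        else (st.1 ++ [id_val], st.2.1, PySem.Set.add st.2.2.1 id_val, st.2.2.2)
      if PySem.Set.contains st1.2.2.2 var_val then st1
      else (st1.1, st1.2.1 ++ [var_val], st1.2.2.1, PySem.Set.add st1.2.2.2 var_val))
    ([], [], [], [])
  let id_order := st.1
  let var_order := st.2.1
  let lookup0 : PySem.Dict String (PySem.Dict String String) :=
    id_order.foldl (fun d i => d.insert i PySem.Dict.empty) PySem.Dict.empty
  let lookup := buffered.foldl
    (fun lk row =>
      lk.modify (pvRowGet row id_column) PySem.Dict.empty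
        (fun inner => inner.insert (pvRowGet row var_column) (pvRowGet row value_column)))
    lookup0
  id_order.map (fun id_val =>
    (var_order.foldl
      (fun out var_val =>
        out.insert var_val ((lookup.getD id_val PySem.Dict.empty).getD var_val fill_value))
      (PySem.Dict.empty.insert id_column id_val)).items)

-- ===== PORT B =====
def unstack_rows_alt (rows : List (List (String × String))) (id_column : String) (var_column : String) (value_column : String) (fill_value : String) : List (List (String × String)) :=
  let buffered := rows
  let ids := PySem.List.dedup (buffered.map (fun r => pvRowGet r id_column))
  let vnames := PySem.List.dedup (buffered.map (fun r => pvRowGet r var_column))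
  ids.map (fun id_val =>
    (vnames.foldl
      (fun out var_val =>
        out.insert var_val
          (match buffered.reverse.find?
              (fun r => pvRowGet r id_column == id_val && pvRowGet r var_column == var_val) with
           | some r => pvRowGet r value_column
           | none => fill_value))
      (PySem.Dict.empty.insert id_column id_val)).items)

-- ===== PRECONDITION & SPEC =====
def Spec_unstack_rows (rows : List (List (String × String))) (id_column : String) (var_column : String) (value_column : String) (fill_value : String) (out : List (List (String × String))) : Prop := out = unstack_rows_alt rows id_column var_column value_column fill_value
instance (rows : List (List (String × String))) (id_column : String) (var_column : String) (value_column : String) (fill_value : String) (out : List (List (String × String))) : Decidable (Spec_unstack_rows rows id_column var_column value_column fill_value out) := by unfold Spec_unstack_rows; infer_instance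

-- ===== CLAIM (what is proved, stated in full; the proofs are below) =====
def Claim_equal_unstack_rows : Prop := ∀ (rows : List (List (String × String))) (id_column : String) (var_column : String) (value_column : String) (fill_value : String), Dom_unstack_rows rows id_column var_column value_column fill_value → Spec_unstack_rows rows id_column var_column value_column fill_value (unstack_rows rows id_column var_column value_column fill_value)

-- ===== LEMMAS AND PROOFS =====

-- Two inserts at distinct keys commute when the first key is already present.
theorem pv_insert_insert_comm {κ ν : Type} [BEq κ] [LawfulBEq κ] (t : PySem.Dict κ ν)
    (i j : κ) (w d0 : ν) (hji : j ≠ i) (hi : t.contains i = true) :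
    (t.insert j d0).insert i w = (t.insert i w).insert j d0 := by
  have hij : i ≠ j := fun h => hji h.symm
  have h1 : (t.insert j d0).contains i = true := by
    rw [PySem.Dict.contains_insert]; simp [hi]
  have h2 : (t.insert i w).contains j = t.contains j := by
    rw [PySem.Dict.contains_insert]; simp [hji]
  apply PySem.Dict.ext
  by_cases hj : t.contains j = true
  · rw [PySem.Dict.items_insert_of_contains _ _ h1,
      PySem.Dict.items_insert_of_contains _ _ hj,
      PySem.Dict.items_insert_of_contains _ _ (h2.trans hj),
      PySem.Dict.items_insert_of_contains _ _ hi,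
      List.map_map, List.map_map]
    apply List.map_congr_left
    intro p _
    by_cases hpj : p.1 = j
    · simp [hpj, hji]
    · by_cases hpi : p.1 = i <;> simp [hpj, hpi, hij]
  · have hj' : t.contains j = false := by simpa using hj
    rw [PySem.Dict.items_insert_of_contains _ _ h1,
      PySem.Dict.items_insert_of_not_contains _ _ hj',
      PySem.Dict.items_insert_of_not_contains _ _ (h2.trans hj'),
      PySem.Dict.items_insert_of_contains _ _ hi,
      List.map_append]
    simp [hji]

-- modify at a present key commutes with insert at a different key.
theorem pv_modify_insert_comm {κ ν : Type} [BEq κ] [LawfulBEq κ] (t : PySem.Dict κ ν)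
    (i j : κ) (d0 d1 : ν) (f : ν → ν) (hji : j ≠ i) (hi : t.contains i = true) :
    (t.insert j d0).modify i d1 f = (t.modify i d1 f).insert j d0 := by
  unfold PySem.Dict.modify
  have hg : (t.insert j d0).getD i d1 = t.getD i d1 := by
    unfold PySem.Dict.getD
    rw [PySem.Dict.get?_insert_of_ne _ _ (fun h => hji h.symm)]
  rw [hg]
  exact pv_insert_insert_comm t i j _ d0 hji hi

theorem pv_foldl_ins_modify_comm {κ ν : Type} [BEq κ] [LawfulBEq κ]
    (F : List κ) (t : PySem.Dict κ ν) (i : κ) (d0 d1 : ν) (f : ν → ν)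
    (hi : t.contains i = true) (hF : ∀ j ∈ F, j ≠ i) :
    (F.foldl (fun d k => d.insert k d0) t).modify i d1 f
      = F.foldl (fun d k => d.insert k d0) (t.modify i d1 f) := by
  induction F generalizing t with
  | nil => rfl
  | cons j F ih =>
    simp only [List.foldl_cons]
    have hji : j ≠ i := hF j (by simp)
    have hi' : (t.insert j d0).contains i = true := by
      rw [PySem.Dict.contains_insert]; simp [hi]
    rw [ih (t.insert j d0) hi' (fun k hk => hF k (by simp [hk])),
      pv_modify_insert_comm t i j d0 d1 f hji hi]

-- seeding a fresh key with d0 and then modifying it (dflt d0) is modifying it directly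
theorem pv_modify_fresh_insert {κ ν : Type} [BEq κ] [LawfulBEq κ] (t : PySem.Dict κ ν)
    (i : κ) (d0 : ν) (f : ν → ν) (hi : t.contains i = false) :
    (t.insert i d0).modify i d0 f = t.modify i d0 f := by
  unfold PySem.Dict.modify
  rw [PySem.Dict.getD_insert_self, PySem.Dict.insert_insert_self,
    PySem.Dict.getD_of_not_contains (h := hi)]

-- the first-occurrence ids of l whose key is not yet in t
def pvFresh {κ ν β : Type} [BEq κ] (key : β → κ) (l : List β) (t : PySem.Dict κ ν) : List κ :=
  (PySem.Set.ofList (l.map key)).filter (fun k => !(t.contains k))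

theorem pvFresh_congr {κ ν ν' β : Type} [BEq κ] (key : β → κ) (l : List β)
    (t : PySem.Dict κ ν) (t' : PySem.Dict κ ν')
    (h : ∀ k, t.contains k = t'.contains k) : pvFresh key l t = pvFresh key l t' := by
  unfold pvFresh
  congr 1
  funext k
  rw [h k]

theorem pvFresh_cons_mem {κ ν β : Type} [BEq κ] [LawfulBEq κ] (key : β → κ) (r : β) (rs : List β)
    (t : PySem.Dict κ ν) (h : t.contains (key r) = true) :
    pvFresh key (r :: rs) t = pvFresh key rs t := by
  unfold pvFresh
  rw [List.map_cons, PySem.Set.ofList_cons]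
  rw [List.filter_cons_of_neg (by simp [h])]
  unfold PySem.Set.discard
  rw [List.filter_filter]
  apply List.filter_congr
  intro y _
  by_cases hy : t.contains y = true
  · simp [hy]
  · have hy' : t.contains y = false := by simpa using hy
    have hne : y ≠ key r := fun he => by rw [he, h] at hy'; exact absurd hy' (by simp)
    simp [hy', hne]

theorem pvFresh_cons_not_mem {κ ν β : Type} [BEq κ] [LawfulBEq κ] (key : β → κ) (r : β) (rs : List β)
    (t : PySem.Dict κ ν) (v : ν) (h : t.contains (key r) = false) :
    pvFresh key (r :: rs) t = key r :: pvFresh key rs (t.insert (key r) v) := by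
  unfold pvFresh
  rw [List.map_cons, PySem.Set.ofList_cons]
  rw [List.filter_cons_of_pos (by simp [h])]
  unfold PySem.Set.discard
  rw [List.filter_filter]
  congr 1
  apply List.filter_congr
  intro y _
  rw [PySem.Dict.contains_insert]
  by_cases hy : y = key r <;> simp [hy, Bool.and_comm]

-- KEY LEMMA 1: pre-seeding all fresh first-occurrence keys with d0 (A's seed pass) is
-- absorbed by the modify loop (A's fill pass).
theorem pv_seed_absorb {κ ν β : Type} [BEq κ] [LawfulBEq κ]
    (key : β → κ) (d0 : ν) (f : β → ν → ν) :
    ∀ (l : List β) (t : PySem.Dict κ ν),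
    l.foldl (fun d r => d.modify (key r) d0 (f r))
        ((pvFresh key l t).foldl (fun d k => d.insert k d0) t)
      = l.foldl (fun d r => d.modify (key r) d0 (f r)) t := by
  intro l
  induction l with
  | nil => intro t; rfl
  | cons r rs ih =>
    intro t
    simp only [List.foldl_cons]
    by_cases h : t.contains (key r) = true
    · rw [pvFresh_cons_mem key r rs t h]
      have hmem : ∀ j ∈ pvFresh key rs t, j ≠ key r := by
        intro j hj he
        have hjc : t.contains j = false := by
          have := List.of_mem_filter hj
          simpa using this
        rw [he, h] at hjc; exact absurd hjc (by simp)
      rw [pv_foldl_ins_modify_comm _ t (key r) d0 d0 (f r) h hmem]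
      have hfr : pvFresh key rs t = pvFresh key rs (t.modify (key r) d0 (f r)) := by
        apply pvFresh_congr
        intro k
        rw [PySem.Dict.contains_modify]
        by_cases hk : k = key r
        · simp [hk, h]
        · simp [hk]
      rw [hfr, ih]
    · have h' : t.contains (key r) = false := by simpa using h
      rw [pvFresh_cons_not_mem key r rs t d0 h']
      simp only [List.foldl_cons]
      have hc : (t.insert (key r) d0).contains (key r) = true := by
        rw [PySem.Dict.contains_insert]; simp
      have hmem : ∀ j ∈ pvFresh key rs (t.insert (key r) d0), j ≠ key r := by
        intro j hj he
        have hjc : (t.insert (key r) d0).contains j = false := by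
          have := List.of_mem_filter hj
          simpa using this
        rw [he, hc] at hjc; exact absurd hjc (by simp)
      rw [pv_foldl_ins_modify_comm _ _ (key r) d0 d0 (f r) hc hmem]
      rw [pv_modify_fresh_insert t (key r) d0 (f r) h']
      have hfr : pvFresh key rs (t.insert (key r) d0)
          = pvFresh key rs (t.modify (key r) d0 (f r)) := by
        apply pvFresh_congr
        intro k
        rw [PySem.Dict.contains_insert, PySem.Dict.contains_modify]
      rw [hfr, ih]

-- A's first pass: on a state of shape (I, V, I, V) it is two Set.add folds.
theorem pv_phase1 (idc vc : String) :
    ∀ (l : List (List (String × String))) (I V : PySem.Set String),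
    l.foldl
      (fun (st : List String × List String × PySem.Set String × PySem.Set String) row =>
        let id_val := pvRowGet row idc
        let var_val := pvRowGet row vc
        let st1 :=
          if PySem.Set.contains st.2.2.1 id_val then st
          else (st.1 ++ [id_val], st.2.1, PySem.Set.add st.2.2.1 id_val, st.2.2.2)
        if PySem.Set.contains st1.2.2.2 var_val then st1
        else (st1.1, st1.2.1 ++ [var_val], st1.2.2.1, PySem.Set.add st1.2.2.2 var_val))
      (I, V, I, V)
    = (l.foldl (fun s r => PySem.Set.add s (pvRowGet r idc)) I,
       l.foldl (fun s r => PySem.Set.add s (pvRowGet r vc)) V,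
       l.foldl (fun s r => PySem.Set.add s (pvRowGet r idc)) I,
       l.foldl (fun s r => PySem.Set.add s (pvRowGet r vc)) V) := by
  intro l
  induction l with
  | nil => intro I V; rfl
  | cons r rs ih =>
    intro I V
    simp only [List.foldl_cons]
    by_cases hI : PySem.Set.contains I (pvRowGet r idc) = true
    · have e1 : PySem.Set.add I (pvRowGet r idc) = I :=
        PySem.Set.add_of_mem ((PySem.Set.contains_iff _ _).mp hI)
      by_cases hV : PySem.Set.contains V (pvRowGet r vc) = true
      · have e2 : PySem.Set.add V (pvRowGet r vc) = V :=
          PySem.Set.add_of_mem ((PySem.Set.contains_iff _ _).mp hV)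
        simp only [hI, hV, if_true, e1, e2]
        exact ih I V
      · have hV' : PySem.Set.contains V (pvRowGet r vc) = false := by simpa using hV
        have e2 : PySem.Set.add V (pvRowGet r vc) = V ++ [pvRowGet r vc] :=
          PySem.Set.add_of_not_mem
            (fun hm => by rw [(PySem.Set.contains_iff _ _).mpr hm] at hV'; simp at hV')
        simp only [hI, hV', if_true, Bool.false_eq_true, if_false, e1, e2]
        exact ih I (V ++ [pvRowGet r vc])
    · have hI' : PySem.Set.contains I (pvRowGet r idc) = false := by simpa using hI
      have e1 : PySem.Set.add I (pvRowGet r idc) = I ++ [pvRowGet r idc] :=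
        PySem.Set.add_of_not_mem
          (fun hm => by rw [(PySem.Set.contains_iff _ _).mpr hm] at hI'; simp at hI')
      by_cases hV : PySem.Set.contains V (pvRowGet r vc) = true
      · have e2 : PySem.Set.add V (pvRowGet r vc) = V :=
          PySem.Set.add_of_mem ((PySem.Set.contains_iff _ _).mp hV)
        simp only [hI', hV, Bool.false_eq_true, if_false, if_true, e1, e2]
        exact ih (I ++ [pvRowGet r idc]) V
      · have hV' : PySem.Set.contains V (pvRowGet r vc) = false := by simpa using hV
        have e2 : PySem.Set.add V (pvRowGet r vc) = V ++ [pvRowGet r vc] :=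
          PySem.Set.add_of_not_mem
            (fun hm => by rw [(PySem.Set.contains_iff _ _).mpr hm] at hV'; simp at hV')
        simp only [hI', hV', Bool.false_eq_true, if_false, e1, e2]
        exact ih (I ++ [pvRowGet r idc]) (V ++ [pvRowGet r vc])

-- KEY LEMMA 2: A's table lookup at (i, v) is B's reverse scan for the last matching row.
theorem pv_lookup_find (idc vc valc fill : String) :
    ∀ (l : List (List (String × String))) (i v : String),
    ((l.foldl
        (fun (d : PySem.Dict String (PySem.Dict String String)) r =>
          d.modify (pvRowGet r idc) PySem.Dict.empty
            (fun c => c.insert (pvRowGet r vc) (pvRowGet r valc)))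
        PySem.Dict.empty).getD i PySem.Dict.empty).getD v fill
      = match l.reverse.find? (fun r => pvRowGet r idc == i && pvRowGet r vc == v) with
        | some r => pvRowGet r valc
        | none => fill := by
  intro l
  induction l using List.reverseRecOn with
  | nil =>
    intro i v
    simp [PySem.Dict.getD_of_not_contains (h := PySem.Dict.contains_empty (k := i)),
      PySem.Dict.getD_of_not_contains (h := PySem.Dict.contains_empty (k := v))]
  | append_singleton l r ih =>
    intro i v
    rw [List.foldl_append, List.foldl_cons, List.foldl_nil, List.reverse_append]
    simp only [List.reverse_cons, List.reverse_nil, List.nil_append, List.cons_append,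
      List.nil_append, List.find?]
    by_cases hk : pvRowGet r idc = i
    · rw [hk, PySem.Dict.getD_modify_self]
      by_cases hv : pvRowGet r vc = v
      · rw [hv, PySem.Dict.getD_insert_self]
        simp
      · rw [PySem.Dict.getD_insert_of_ne _ _ _ (Ne.symm hv)]
        have hb : (i == i && pvRowGet r vc == v) = false := by simp [hv]
        rw [hb]
        exact ih i v
    · rw [PySem.Dict.getD_modify_of_ne _ _ _ (Ne.symm hk)]
      have hb : (pvRowGet r idc == i && pvRowGet r vc == v) = false := by simp [hk]
      rw [hb]
      exact ih i v

-- ===== VERDICT (by name: the statement is the Claim_ definition above) =====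
theorem unstack_rows_spec : Claim_equal_unstack_rows := by
  intro rows idc vc valc fill _
  unfold Spec_unstack_rows unstack_rows unstack_rows_alt
  simp only []
  rw [pv_phase1 idc vc rows [] []]
  have hid : rows.foldl (fun s r => PySem.Set.add s (pvRowGet r idc)) []
      = PySem.Set.ofList (rows.map (fun r => pvRowGet r idc)) := by
    rw [← PySem.Set.update_map_eq_foldl_add, PySem.Set.update_nil_left]
  have hvar : rows.foldl (fun s r => PySem.Set.add s (pvRowGet r vc)) []
      = PySem.Set.ofList (rows.map (fun r => pvRowGet r vc)) := by
    rw [← PySem.Set.update_map_eq_foldl_add, PySem.Set.update_nil_left]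
  simp only [hid, hvar, PySem.List.dedup_eq_ofList]
  have hfresh : pvFresh (fun r => pvRowGet r idc) rows
        (PySem.Dict.empty : PySem.Dict String (PySem.Dict String String))
      = PySem.Set.ofList (rows.map (fun r => pvRowGet r idc)) := by
    unfold pvFresh
    simp [PySem.Dict.contains_empty]
  have habs := pv_seed_absorb (fun r => pvRowGet r idc)
      (PySem.Dict.empty : PySem.Dict String String)
      (fun r (cell : PySem.Dict String String) =>
        cell.insert (pvRowGet r vc) (pvRowGet r valc)) rows PySem.Dict.empty
  rw [hfresh] at habs
  rw [habs]
  simp only [pv_lookup_find idc vc valc fill rows]
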